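-- pv_equiv track=rewrite | github.com/Mr-z66/LEAP | core_package/answer_extraction_svamp.py | trim_to_conclusion_span
-- ===== SOURCE A (Python) =====
-- def trim_to_conclusion_span(clause: str) -> str:
--     lower = clause.lower()
--     markers = [
--         "final answer",
--         "the answer is",
--         "answer:",
--         "therefore",
--         "thus",
--         "hence",
--         "so,",
--         "so ",
--     ]
--     last_idx = -1
--     for marker in markers:
--         idx = lower.rfind(marker)
--         if idx > last_idx:
--             last_idx = idx
--     return clause[last_idx:] if last_idx >= 0 else clause
-- ===== SOURCE B (Python) =====
-- def trim_to_conclusion_span(clause: str) -> str: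
--     lower = clause.lower()
--     markers = (
--         "final answer",
--         "the answer is",
--         "answer:",
--         "therefore",
--         "thus",
--         "hence",
--         "so,",
--         "so ",
--     )
--     for i in range(len(lower) - 1, -1, -1):
--         if any(lower.startswith(m, i) for m in markers):
--             return clause[i:]
--     return clause
-- ===== Notes on version B (the rewrite author's own statement) =====
-- stated objective: alternative
-- what changed: Instead of calling rfind once per marker and keeping the maximum index, B lowercases once and walks positions from the end of the string, testing each marker with startswith at that position and returning the suffix at the first (i.e. highest) matching position.
import Mathlib
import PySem

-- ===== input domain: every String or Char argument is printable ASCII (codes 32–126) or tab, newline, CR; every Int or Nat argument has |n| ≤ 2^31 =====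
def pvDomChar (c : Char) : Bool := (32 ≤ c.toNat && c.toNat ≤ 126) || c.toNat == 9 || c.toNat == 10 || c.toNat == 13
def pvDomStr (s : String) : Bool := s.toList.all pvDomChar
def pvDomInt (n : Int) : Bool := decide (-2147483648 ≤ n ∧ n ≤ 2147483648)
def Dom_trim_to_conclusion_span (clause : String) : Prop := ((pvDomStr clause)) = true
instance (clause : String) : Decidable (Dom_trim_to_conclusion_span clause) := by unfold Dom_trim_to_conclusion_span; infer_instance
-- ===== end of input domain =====

-- B replaces the per-marker rfind/max scan by a single backward walk over string
-- positions testing the markers with startswith (alternative decomposition, same cost).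

-- ===== PORT A =====
def pvMarkersA : List String :=
  ["final answer", "the answer is", "answer:", "therefore", "thus", "hence", "so,", "so "]

def trim_to_conclusion_span (clause : String) : String :=
  let lower := PySem.Str.lower clause
  let last_idx := pvMarkersA.foldl
    (fun last_idx marker =>
      let idx := PySem.Str.rfind lower marker
      if idx > last_idx then idx else last_idx) (-1 : Int)
  if last_idx ≥ 0 then PySem.Str.slice clause (some last_idx) none else clause

-- ===== PORT B =====
def pvMarkersB : List String :=
  ["final answer", "the answer is", "answer:", "therefore", "thus", "hence", "so,", "so "]

-- Source B's loop `for i in range(len(lower)-1, -1, -1)`; Python's `lower.startswith(m, i)`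
-- with 0 ≤ i ≤ len(lower) is exactly `startswith` of the suffix `lower[i:]`,
-- ported as `PySem.Chars.startswith (lower.drop i)`.
def pvAltGo (clause : String) (lower : List Char) : Nat → String
  | 0 => clause
  | k+1 =>
    if pvMarkersB.any (fun m => PySem.Chars.startswith (lower.drop k) m.toList) then
      PySem.Str.slice clause (some (k : Int)) none
    else pvAltGo clause lower k

def trim_to_conclusion_span_alt (clause : String) : String :=
  let lower := (PySem.Str.lower clause).toList
  pvAltGo clause lower lower.length

-- ===== PRECONDITION & SPEC =====
def Spec_trim_to_conclusion_span (clause : String) (out : String) : Prop := out = trim_to_conclusion_span_alt clause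
instance (clause : String) (out : String) : Decidable (Spec_trim_to_conclusion_span clause out) := by unfold Spec_trim_to_conclusion_span; infer_instance

-- ===== CLAIM (what is proved, stated in full; the proofs are below) =====
def Claim_equal_trim_to_conclusion_span : Prop := ∀ (clause : String), Dom_trim_to_conclusion_span clause → Spec_trim_to_conclusion_span clause (trim_to_conclusion_span clause)

-- ===== LEMMAS AND PROOFS =====

-- "some marker matches at position i of L"
def pvAny (L : List Char) (i : Nat) : Bool :=
  pvMarkersB.any (fun m => PySem.Chars.startswith (L.drop i) m.toList)

-- the index B's backward walk from position k-1 finds (-1 if none)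
def pvH (L : List Char) : Nat → Int
  | 0 => -1
  | k+1 => if pvAny L k then (k : Int) else pvH L k

-- A's fold, with rfind frozen at scan level k
def pvFold (L : List Char) (k : Nat) (ms : List String) (a : Int) : Int :=
  ms.foldl (fun acc m =>
    if PySem.Chars.rfind.go L m.toList k > acc then PySem.Chars.rfind.go L m.toList k else acc) a

theorem pv_go_le (L sub : List Char) (k : Nat) : PySem.Chars.rfind.go L sub k ≤ (k : Int) := by
  induction k with
  | zero => simp only [PySem.Chars.rfind.go]; split <;> simp
  | succ k ih =>
    simp only [PySem.Chars.rfind.go]; split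
    · simp
    · exact le_trans ih (by exact_mod_cast Nat.le_succ k)

theorem pvFold_const (L : List Char) (k : Nat) (ms : List String) (a : Int)
    (h : ∀ m ∈ ms, PySem.Chars.rfind.go L m.toList k ≤ a) : pvFold L k ms a = a := by
  induction ms with
  | nil => rfl
  | cons m ms ih =>
    simp only [pvFold, List.foldl_cons] at *
    have hm := h m (by simp)
    rw [if_neg (by omega)]
    exact ih (fun m' hm' => h m' (by simp [hm']))

theorem pvFold_step (L : List Char) (k : Nat) (ms : List String) (a : Int)
    (hak : a ≤ (k : Int)) :
    pvFold L (k+1) ms a =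
      if ms.any (fun m => m.toList.isPrefixOf (L.drop (k+1))) then ((k+1 : Nat) : Int)
      else pvFold L k ms a := by
  induction ms generalizing a with
  | nil => simp [pvFold]
  | cons m ms ih =>
    simp only [pvFold, List.foldl_cons, List.any_cons] at *
    by_cases hp : m.toList.isPrefixOf (L.drop (k+1)) = true
    · rw [show PySem.Chars.rfind.go L m.toList (k+1) = ((k+1 : Nat) : Int) by
        simp only [PySem.Chars.rfind.go]; rw [if_pos hp]]
      rw [if_pos (by omega)]
      have hc := pvFold_const L (k+1) ms (((k+1 : Nat) : Int))
        (fun m' _ => by have := pv_go_le L m'.toList (k+1); exact_mod_cast this)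
      simp only [pvFold] at hc
      simp only [hp, Bool.true_or, if_true]
      exact hc
    · rw [show PySem.Chars.rfind.go L m.toList (k+1) = PySem.Chars.rfind.go L m.toList k by
        simp only [PySem.Chars.rfind.go]; rw [if_neg hp]]
      have hle := pv_go_le L m.toList k
      by_cases hgt : PySem.Chars.rfind.go L m.toList k > a
      · rw [if_pos hgt, ih _ (by omega)]
        simp [hp]
      · rw [if_neg hgt, ih _ hak]
        simp [hp]

theorem pvFold_zero (L : List Char) (ms : List String) :
    pvFold L 0 ms (-1) =
      if ms.any (fun m => m.toList.isPrefixOf (L.drop 0)) then (0 : Int) else -1 := by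
  induction ms with
  | nil => simp [pvFold]
  | cons m ms ih =>
    simp only [pvFold, List.foldl_cons, List.any_cons] at *
    by_cases hp : m.toList.isPrefixOf L = true
    · rw [show PySem.Chars.rfind.go L m.toList 0 = (0 : Int) by
        simp only [PySem.Chars.rfind.go]; rw [if_pos (by simpa using hp)]]
      rw [if_pos (by omega)]
      have := pvFold_const L 0 ms (0 : Int)
        (fun m' _ => pv_go_le L m'.toList 0)
      simp only [pvFold] at this
      rw [this]
      simp only [List.drop_zero] at hp ⊢
      simp [hp]
    · rw [show PySem.Chars.rfind.go L m.toList 0 = (-1 : Int) by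
        simp only [PySem.Chars.rfind.go]; rw [if_neg (by simpa using hp)]]
      rw [if_neg (by omega), ih]
      simp at hp
      simp [hp]

theorem pvAny_eq (L : List Char) (i : Nat) :
    pvAny L i = pvMarkersB.any (fun m => m.toList.isPrefixOf (L.drop i)) := by
  simp [pvAny, PySem.Chars.startswith]

theorem pvFold_eq_H (L : List Char) (k : Nat) :
    pvFold L k pvMarkersA (-1) = pvH L (k+1) := by
  induction k with
  | zero =>
    rw [pvFold_zero]
    simp only [pvH, pvAny_eq]
    rfl
  | succ k ih =>
    rw [pvFold_step L k pvMarkersA (-1) (by omega), ih]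
    simp only [pvH, pvAny_eq]
    rfl

theorem pvAltGo_eq (clause : String) (L : List Char) (k : Nat) :
    pvAltGo clause L k =
      if 0 ≤ pvH L k then PySem.Str.slice clause (some (pvH L k)) none else clause := by
  induction k with
  | zero => simp [pvAltGo, pvH]
  | succ k ih =>
    have e : (pvMarkersB.any fun m => PySem.Chars.startswith (L.drop k) m.toList) = pvAny L k := rfl
    simp only [pvAltGo, pvH, e]
    by_cases h : pvAny L k = true
    · rw [if_pos h, if_pos h, if_pos (by positivity)]
    · rw [if_neg h, if_neg h, ih]

theorem pvAny_length (L : List Char) : pvAny L L.length = false := by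
  rw [pvAny_eq, List.drop_length]
  decide

theorem pvH_top (L : List Char) : pvH L (L.length + 1) = pvH L L.length := by
  simp [pvH, pvAny_length]

-- ===== VERDICT (by name: the statement is the Claim_ definition above) =====
theorem trim_to_conclusion_span_spec : Claim_equal_trim_to_conclusion_span := by
  intro clause _
  unfold Spec_trim_to_conclusion_span trim_to_conclusion_span trim_to_conclusion_span_alt
  set L := (PySem.Str.lower clause).toList with hL
  show (if pvFold L L.length pvMarkersA (-1) ≥ 0
          then PySem.Str.slice clause (some (pvFold L L.length pvMarkersA (-1))) none else clause)
      = pvAltGo clause L L.length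
  rw [pvFold_eq_H, pvH_top, pvAltGo_eq]
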